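-- pv_equiv track=rewrite | github.com/matthiscsi/two_claps_startupapps | src/ui_logic.py | pick_default_monitor_option
-- ===== SOURCE A (Python) =====
-- def pick_default_monitor_option(monitor_options, current_monitor):
--     if not monitor_options:
--         return "Monitor 0: 1920x1080 (Primary)"
--
--     selected_option = monitor_options[0]
--     if current_monitor is not None:
--         for option in monitor_options:
--             if option.startswith(f"Monitor {current_monitor}:"):
--                 return option
--
--     for option in monitor_options:
--         if "(Primary)" in option:
--             selected_option = option
--             break
--     return selected_option
-- ===== SOURCE B (Python) =====
-- def pick_default_monitor_option(monitor_options, current_monitor):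
--     if not monitor_options:
--         return "Monitor 0: 1920x1080 (Primary)"
--     prefix = None if current_monitor is None else f"Monitor {current_monitor}:"
--     primary = None
--     for option in monitor_options:
--         if prefix is not None and option.startswith(prefix):
--             return option
--         if primary is None and "(Primary)" in option:
--             primary = option
--     return primary if primary is not None else monitor_options[0]
-- ===== Notes on version B (the rewrite author's own statement) =====
-- stated objective: alternative
-- what changed: Replaces A's two separate scans (one for the current-monitor prefix, one for the first '(Primary)' entry) with a single traversal that returns a current match immediately and records only the first primary candidate.
import Mathlib
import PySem

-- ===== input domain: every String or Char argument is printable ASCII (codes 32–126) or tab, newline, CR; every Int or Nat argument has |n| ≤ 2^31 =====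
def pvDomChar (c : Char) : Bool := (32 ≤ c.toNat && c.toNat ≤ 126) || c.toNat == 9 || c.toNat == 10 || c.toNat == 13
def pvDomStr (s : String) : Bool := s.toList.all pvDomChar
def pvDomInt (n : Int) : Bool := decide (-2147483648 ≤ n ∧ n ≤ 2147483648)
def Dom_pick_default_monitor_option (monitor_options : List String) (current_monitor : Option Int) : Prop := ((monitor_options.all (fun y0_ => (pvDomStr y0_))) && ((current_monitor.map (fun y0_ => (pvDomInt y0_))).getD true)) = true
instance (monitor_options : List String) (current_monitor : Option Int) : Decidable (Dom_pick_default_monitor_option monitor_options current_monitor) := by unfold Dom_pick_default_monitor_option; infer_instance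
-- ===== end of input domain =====

-- B replaces A's two separate scans with one pass keeping a first-primary accumulator; same return value (alternative decomposition, no speed claim).

-- ===== PORT A =====
def pick_default_monitor_option (monitor_options : List String) (current_monitor : Option Int) : String :=
  match monitor_options with
  | [] => "Monitor 0: 1920x1080 (Primary)"
  | first :: _ =>
    -- 'if current_monitor is not None: for option …: if option.startswith(f"Monitor {current_monitor}:"): return option'
    match (match current_monitor with
           | some c => monitor_options.find? (fun option => PySem.Str.startswith option ("Monitor " ++ PySem.Int.toStr c ++ ":"))
           | none => none) with
    | some option => option
    | none =>
      -- 'for option …: if "(Primary)" in option: selected_option = option; break' then return selected_option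
      match monitor_options.find? (fun option => PySem.Str.isIn "(Primary)" option) with
      | some option => option
      | none => first

-- ===== PORT B =====
-- single pass: return a current-monitor match at once; remember only the FIRST primary candidate
def preTest (pre : Option String) (option : String) : Bool :=
  match pre with | some p => PySem.Str.startswith option p | none => false

def pickGo (pre : Option String) (first : String) (primary : Option String) : List String → String
  | [] => (match primary with | some p => p | none => first)
  | option :: rest =>
    if preTest pre option then option
    else pickGo pre first
      (if primary.isNone && PySem.Str.isIn "(Primary)" option then some option else primary) rest

def pick_default_monitor_option_alt (monitor_options : List String) (current_monitor : Option Int) : String :=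
  match monitor_options with
  | [] => "Monitor 0: 1920x1080 (Primary)"
  | first :: _ =>
    pickGo (current_monitor.map (fun c => "Monitor " ++ PySem.Int.toStr c ++ ":")) first none monitor_options

-- ===== PRECONDITION & SPEC =====
def Spec_pick_default_monitor_option (monitor_options : List String) (current_monitor : Option Int) (out : String) : Prop := out = pick_default_monitor_option_alt monitor_options current_monitor
instance (monitor_options : List String) (current_monitor : Option Int) (out : String) : Decidable (Spec_pick_default_monitor_option monitor_options current_monitor out) := by unfold Spec_pick_default_monitor_option; infer_instance

-- ===== CLAIM (what is proved, stated in full; the proofs are below) =====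
def Claim_equal_pick_default_monitor_option : Prop := ∀ (monitor_options : List String) (current_monitor : Option Int), Dom_pick_default_monitor_option monitor_options current_monitor → Spec_pick_default_monitor_option monitor_options current_monitor (pick_default_monitor_option monitor_options current_monitor)

-- ===== LEMMAS AND PROOFS =====
theorem pickGo_eq (pre : Option String) (first : String) :
    ∀ (l : List String) (primary : Option String),
    pickGo pre first primary l =
      match l.find? (fun o => preTest pre o) with
      | some o => o
      | none =>
        match primary with
        | some p => p
        | none =>
          match l.find? (fun o => PySem.Str.isIn "(Primary)" o) with
          | some o => o
          | none => first := by
  intro l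
  induction l with
  | nil => intro primary; rfl
  | cons o rest ih =>
    intro primary
    by_cases hc : preTest pre o = true
    · rw [List.find?_cons_of_pos hc]
      simp only [pickGo, hc, if_true]
    · have hc' : preTest pre o = false := by simpa using hc
      rw [List.find?_cons_of_neg (by simp [hc'])]
      simp only [pickGo, hc', Bool.false_eq_true, if_false, ih]
      cases primary with
      | some p => rfl
      | none =>
        by_cases hp : PySem.Str.isIn "(Primary)" o = true
        · rw [List.find?_cons_of_pos hp]
          simp only [Option.isNone_none, Bool.true_and, hp, if_true]
        · have hp' : PySem.Str.isIn "(Primary)" o = false := by simpa using hp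
          rw [List.find?_cons_of_neg (by simpa using hp')]
          simp only [Option.isNone_none, Bool.true_and, hp', Bool.false_eq_true, if_false]

-- ===== VERDICT (by name: the statement is the Claim_ definition above) =====
theorem pick_default_monitor_option_spec : Claim_equal_pick_default_monitor_option := by
  intro mo cm _
  unfold Spec_pick_default_monitor_option pick_default_monitor_option pick_default_monitor_option_alt
  cases mo with
  | nil => rfl
  | cons first rest =>
    cases cm with
    | none =>
      simp only [Option.map_none]
      rw [pickGo_eq]
      have h0 : ((first :: rest).find? (fun o => preTest none o)) = none := by
        simp [List.find?_eq_none, preTest]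
      rw [h0]
    | some c =>
      simp only [Option.map_some]
      rw [pickGo_eq]
      simp only [preTest]
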